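-- pv_equiv track=rewrite | github.com/lihebi/kicadpcb-converter | main.py | twoify
-- ===== SOURCE A (Python) =====
-- import copy
--
-- def twoify(mat):
--     # step 1: separate into 2-pairs with string name
--     mat = copy.deepcopy(mat)
--     h = {}
--     recorded = set()
--     for row in mat:
--         for i in range(len(row)):
--             v = row[i]
--             if v != 0 and v != 1:
--                 if v in h:
--                     if v in recorded:
--                         recorded.remove(v)
--                     else:
--                         h[v] += 1
--                         recorded.add(v)
--                 else:
--                     h[v] = 1
--                     recorded.add(v)
--                 row[i] = str(v) + "-" + str(h[v])
--     # single ones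
--     singles = set()
--     for v in recorded:
--         singles.add(str(v) + "-" + str(h[v]))
--     # step 2: map string names to integer
--     h = {}
--     ct = 2
--     # FIXME I might want to randomly get 2-pairs
--     for row in mat:
--         for i in range(len(row)):
--             v = row[i]
--             if v != 0 and v != 1:
--                 # the recorded ones are not paired
--                 if v in singles:
--                     h[v] = 1
--                 # assign a larger number
--                 elif v not in h:
--                     h[v] = ct
--                     ct += 1
--                 row[i] = h[v]
--     return mat
-- ===== SOURCE B (Python) =====
-- def twoify(mat):
--     # one labeled pass: precompute totals, then assign pair ids directly (no string labels)
--     counts = {}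
--     for row in mat:
--         for v in row:
--             if v != 0 and v != 1:
--                 counts[v] = counts.get(v, 0) + 1
--     occ = {}
--     pair_id = {}
--     ct = 2
--     out = []
--     for row in mat:
--         new_row = []
--         for v in row:
--             if v == 0 or v == 1:
--                 new_row.append(v)
--             else:
--                 o = occ.get(v, 0) + 1
--                 occ[v] = o
--                 if counts[v] % 2 == 1 and o == counts[v]:
--                     new_row.append(1)
--                 else:
--                     key = (v, (o - 1) // 2)
--                     if key not in pair_id:
--                         pair_id[key] = ct
--                         ct += 1
--                     new_row.append(pair_id[key])
--         out.append(new_row)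
--     return out
-- ===== Notes on version B (the rewrite author's own statement) =====
-- stated objective: alternative
-- what changed: Replaces A's two-pass string-relabelling scheme (temporary 'value-ceil(occ/2)' string labels, a toggling 'recorded' set, then a second pass mapping label strings to integers) by one counting pass plus one labelled pass that assigns pair ids directly from a per-value running occurrence index and a (value, pair_index)-keyed dict, never creating strings.
import Mathlib
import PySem

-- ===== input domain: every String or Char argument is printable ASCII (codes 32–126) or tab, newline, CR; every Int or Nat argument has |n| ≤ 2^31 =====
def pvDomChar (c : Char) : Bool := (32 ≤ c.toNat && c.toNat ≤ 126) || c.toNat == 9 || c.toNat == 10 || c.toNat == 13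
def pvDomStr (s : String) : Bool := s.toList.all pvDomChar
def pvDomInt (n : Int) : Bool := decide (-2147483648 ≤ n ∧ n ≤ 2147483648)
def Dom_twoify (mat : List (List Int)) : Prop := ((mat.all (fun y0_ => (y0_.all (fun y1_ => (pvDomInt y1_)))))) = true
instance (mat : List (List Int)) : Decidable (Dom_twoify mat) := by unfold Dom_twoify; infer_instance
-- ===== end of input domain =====

-- B replaces A's two-pass string-relabelling (temporary "v-k" string labels + a toggling
-- 'recorded' set, then a second pass mapping labels to ints) by one counting pass plus one
-- labelled pass assigning pair ids directly from (value, pair-index) keys; same exact output.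

-- ===== PORT A =====
-- A's intermediate matrix holds ints (0/1, untouched) or strings (the labels): Int ⊕ List Char.
inductive PvCell
  | int : Int → PvCell
  | str : List Char → PvCell
deriving DecidableEq, Repr

-- str(v) + "-" + str(k)
def pvEnc (v k : Int) : List Char := PySem.Int.toChars v ++ '-' :: PySem.Int.toChars k

def pvStep1Cell (st : PySem.Dict Int Int × PySem.Set Int) (v : Int) :
    (PySem.Dict Int Int × PySem.Set Int) × PvCell :=
  if v ≠ 0 ∧ v ≠ 1 then
    let hr :=
      if st.1.contains v then
        if PySem.Set.contains st.2 v then (st.1, PySem.Set.discard st.2 v)  -- recorded.remove(v), v known present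
        else (st.1.insert v (st.1.getD v 0 + 1), PySem.Set.add st.2 v)      -- h[v] += 1 (key present)
      else (st.1.insert v 1, PySem.Set.add st.2 v)
    (hr, PvCell.str (pvEnc v (hr.1.getD v 0)))                                 -- row[i] = str(v)+"-"+str(h[v])
  else (st, PvCell.int v)

def pvStep1Row (st : PySem.Dict Int Int × PySem.Set Int) (row : List Int) :
    (PySem.Dict Int Int × PySem.Set Int) × List PvCell :=
  row.foldl (fun p v =>
    let r := pvStep1Cell p.1 v
    (r.1, p.2 ++ [r.2])) (st, [])

def pvStep1 (mat : List (List Int)) :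
    (PySem.Dict Int Int × PySem.Set Int) × List (List PvCell) :=
  mat.foldl (fun p row =>
    let r := pvStep1Row p.1 row
    (r.1, p.2 ++ [r.2])) ((PySem.Dict.empty, PySem.Set.empty), [])

def pvStep2Go (singles : PySem.Set PvCell) (st : PySem.Dict PvCell Int × Int) (key : PvCell) :
    (PySem.Dict PvCell Int × Int) × Int :=
  let hc :=
    if PySem.Set.contains singles key then (st.1.insert key 1, st.2)
    else if ¬ st.1.contains key then (st.1.insert key st.2, st.2 + 1)
    else st
  (hc, hc.1.getD key 0)                                                     -- row[i] = h[v] (key present)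

def pvStep2Cell (singles : PySem.Set PvCell) (st : PySem.Dict PvCell Int × Int) (c : PvCell) :
    (PySem.Dict PvCell Int × Int) × Int :=
  match c with
  | PvCell.int n => if n ≠ 0 ∧ n ≠ 1 then pvStep2Go singles st (PvCell.int n) else (st, n)
  | PvCell.str s => pvStep2Go singles st (PvCell.str s)     -- a Python str is never == 0 or == 1

def pvStep2Row (singles : PySem.Set PvCell) (st : PySem.Dict PvCell Int × Int) (row : List PvCell) :
    (PySem.Dict PvCell Int × Int) × List Int :=
  row.foldl (fun p c =>
    let r := pvStep2Cell singles p.1 c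
    (r.1, p.2 ++ [r.2])) (st, [])

def pvStep2 (singles : PySem.Set PvCell) (lmat : List (List PvCell)) :
    (PySem.Dict PvCell Int × Int) × List (List Int) :=
  lmat.foldl (fun p row =>
    let r := pvStep2Row singles p.1 row
    (r.1, p.2 ++ [r.2])) ((PySem.Dict.empty, 2), [])

def twoify (mat : List (List Int)) : List (List Int) :=
  let s1 := pvStep1 mat
  let singles : PySem.Set PvCell :=
    s1.1.2.foldl (fun s v => PySem.Set.add s (PvCell.str (pvEnc v (s1.1.1.getD v 0)))) PySem.Set.empty
  (pvStep2 singles s1.2).2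

-- ===== PORT B =====
def pvCounts (mat : List (List Int)) : PySem.Dict Int Int :=
  mat.foldl (fun d row =>
    row.foldl (fun d v => if v ≠ 0 ∧ v ≠ 1 then d.insert v (d.getD v 0 + 1) else d) d)
    PySem.Dict.empty

def pvAltCell (counts : PySem.Dict Int Int)
    (st : PySem.Dict Int Int × PySem.Dict (Int × Int) Int × Int) (v : Int) :
    (PySem.Dict Int Int × PySem.Dict (Int × Int) Int × Int) × Int :=
  if v = 0 ∨ v = 1 then (st, v)
  else
    let o := st.1.getD v 0 + 1
    let occ := st.1.insert v o
    let c := counts.getD v 0     -- counts[v]: the key is always present here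
    if PySem.Int.mod c 2 = 1 ∧ o = c then ((occ, st.2.1, st.2.2), 1)
    else
      let key := (v, PySem.Int.floordiv (o - 1) 2)
      if st.2.1.contains key then ((occ, st.2.1, st.2.2), st.2.1.getD key 0)
      else ((occ, st.2.1.insert key st.2.2, st.2.2 + 1), st.2.2)

def pvAltRow (counts : PySem.Dict Int Int)
    (st : PySem.Dict Int Int × PySem.Dict (Int × Int) Int × Int) (row : List Int) :
    (PySem.Dict Int Int × PySem.Dict (Int × Int) Int × Int) × List Int :=
  row.foldl (fun p v =>
    let r := pvAltCell counts p.1 v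
    (r.1, p.2 ++ [r.2])) (st, [])

def twoify_alt (mat : List (List Int)) : List (List Int) :=
  let counts := pvCounts mat
  (mat.foldl (fun p row =>
    let r := pvAltRow counts p.1 row
    (r.1, p.2 ++ [r.2])) ((PySem.Dict.empty, PySem.Dict.empty, 2), [])).2

-- ===== PRECONDITION & SPEC =====
def Spec_twoify (mat : List (List Int)) (out : List (List Int)) : Prop := out = twoify_alt mat
instance (mat : List (List Int)) (out : List (List Int)) : Decidable (Spec_twoify mat out) := by unfold Spec_twoify; infer_instance

-- ===== CLAIM (what is proved, stated in full; the proofs are below) =====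
def Claim_equal_twoify : Prop := ∀ (mat : List (List Int)), Dom_twoify mat → Spec_twoify mat (twoify mat)

-- ===== LEMMAS AND PROOFS =====

-- ---- label-string injectivity ----
lemma pv_digitChar_inj {a b : Nat} (ha : a < 10) (hb : b < 10)
    (h : Nat.digitChar a = Nat.digitChar b) : a = b := by
  interval_cases a <;> interval_cases b <;> simp_all [Nat.digitChar]

lemma pv_toDigits_inj : ∀ m n : Nat, Nat.toDigits 10 m = Nat.toDigits 10 n → m = n := by
  intro m
  induction m using Nat.strong_induction_on with
  | _ m ih =>
    intro n h
    rcases lt_or_ge m 10 with hm | hm <;> rcases lt_or_ge n 10 with hn | hn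
    · rw [Nat.toDigits_of_lt_base hm, Nat.toDigits_of_lt_base hn] at h
      exact pv_digitChar_inj hm hn (List.cons_eq_cons.mp h).1
    · rw [Nat.toDigits_of_lt_base hm, Nat.toDigits_of_base_le (by norm_num) hn] at h
      have := congrArg List.length h
      have hp := @Nat.length_toDigits_pos 10 (n / 10)
      simp only [List.length_cons, List.length_append] at this; omega
    · rw [Nat.toDigits_of_lt_base hn, Nat.toDigits_of_base_le (by norm_num) hm] at h
      have := congrArg List.length h
      have hp := @Nat.length_toDigits_pos 10 (m / 10)
      simp only [List.length_cons, List.length_append] at this; omega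
    · rw [Nat.toDigits_of_base_le (by norm_num) hm, Nat.toDigits_of_base_le (by norm_num) hn] at h
      obtain ⟨h1, h2⟩ := List.append_inj' h rfl
      have hdiv : m / 10 = n / 10 := ih (m / 10) (Nat.div_lt_self (by omega) (by norm_num)) _ h1
      have hmod : m % 10 = n % 10 :=
        pv_digitChar_inj (Nat.mod_lt _ (by norm_num)) (Nat.mod_lt _ (by norm_num))
          (List.cons_eq_cons.mp h2).1
      omega

lemma pv_noDash (n : Nat) : '-' ∉ Nat.toDigits 10 n := by
  intro hm
  have := Nat.isDigit_of_mem_toDigits (b := 10) (by norm_num) (by norm_num) hm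
  simp [Char.isDigit] at this

lemma pv_toChars_noDash {k : Int} (hk : 1 ≤ k) : '-' ∉ PySem.Int.toChars k := by
  have : ¬ k < 0 := by omega
  simp [PySem.Int.toChars, this, pv_noDash]

lemma pv_toChars_inj {a b : Int} (h : PySem.Int.toChars a = PySem.Int.toChars b) : a = b := by
  unfold PySem.Int.toChars at h
  split_ifs at h with h1 h2 h2
  · have := pv_toDigits_inj _ _ (List.cons_eq_cons.mp h).2
    omega
  · exfalso
    have hp := @Nat.length_toDigits_pos 10 b.toNat
    obtain ⟨c, t, hct⟩ := List.exists_cons_of_ne_nil (List.ne_nil_of_length_pos hp)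
    rw [hct] at h
    have hc : '-' = c := (List.cons_eq_cons.mp h).1
    exact pv_noDash b.toNat (by rw [hct, ← hc]; exact List.mem_cons_self)
  · exfalso
    have hp := @Nat.length_toDigits_pos 10 a.toNat
    obtain ⟨c, t, hct⟩ := List.exists_cons_of_ne_nil (List.ne_nil_of_length_pos hp)
    rw [hct] at h
    have hc : c = '-' := (List.cons_eq_cons.mp h).1
    exact pv_noDash a.toNat (by rw [hct, hc]; exact List.mem_cons_self)
  · have := pv_toDigits_inj _ _ h
    omega

lemma pv_append_dash_inj {l1 l2 d1 d2 : List Char} (h1 : '-' ∉ d1) (h2 : '-' ∉ d2)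
    (h : l1 ++ '-' :: d1 = l2 ++ '-' :: d2) : l1 = l2 ∧ d1 = d2 := by
  have hlen : d1.length = d2.length := by
    by_contra hne
    have s1 : ('-' :: d1) <:+ (l2 ++ '-' :: d2) := ⟨l1, h⟩
    have s2 : ('-' :: d2) <:+ (l2 ++ '-' :: d2) := ⟨l2, rfl⟩
    rcases List.suffix_or_suffix_of_suffix s1 s2 with hs | hs
    · rcases List.suffix_cons_iff.mp hs with heq | hs'
      · exact hne (by rw [(List.cons_eq_cons.mp heq).2])
      · exact h2 (hs'.subset List.mem_cons_self)
    · rcases List.suffix_cons_iff.mp hs with heq | hs'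
      · exact hne (by rw [(List.cons_eq_cons.mp heq).2])
      · exact h1 (hs'.subset List.mem_cons_self)
  have hll : l1.length = l2.length := by
    have := congrArg List.length h; simp only [List.length_cons, List.length_append] at this; omega
  obtain ⟨ha, hb⟩ := List.append_inj h hll
  exact ⟨ha, (List.cons_eq_cons.mp hb).2⟩

lemma pv_enc_inj {v k v' k' : Int} (hk : 1 ≤ k) (hk' : 1 ≤ k')
    (h : pvEnc v k = pvEnc v' k') : v = v' ∧ k = k' := by
  obtain ⟨h1, h2⟩ := pv_append_dash_inj (pv_toChars_noDash hk) (pv_toChars_noDash hk') h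
  exact ⟨pv_toChars_inj h1, pv_toChars_inj h2⟩

-- ---- pass-1 invariant and ghost labelling ----
def PvInv1 (p : List Int) (st : PySem.Dict Int Int × PySem.Set Int) : Prop :=
  (∀ v : Int, v ≠ 0 → v ≠ 1 → st.1.getD v 0 = (((p.count v + 1) / 2 : Nat) : Int)) ∧
  (∀ v : Int, v ≠ 0 → v ≠ 1 → (st.1.contains v = true ↔ 0 < p.count v)) ∧
  (∀ v : Int, v ≠ 0 → v ≠ 1 → (v ∈ st.2 ↔ p.count v % 2 = 1)) ∧
  (∀ v ∈ st.2, v ≠ 0 ∧ v ≠ 1)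

def pvLabel (p : List Int) (v : Int) : PvCell :=
  if v ≠ 0 ∧ v ≠ 1 then PvCell.str (pvEnc v (((p.count v / 2 : Nat) : Int) + 1)) else PvCell.int v

def pvGhostRow : List Int → List Int → List PvCell
  | _, [] => []
  | p, v :: t => pvLabel p v :: pvGhostRow (p ++ [v]) t

def pvGhostMat : List Int → List (List Int) → List (List PvCell)
  | _, [] => []
  | p, row :: t => pvGhostRow p row :: pvGhostMat (p ++ row) t

lemma pv_count_append (p : List Int) (v w : Int) :
    (p ++ [v]).count w = p.count w + if w = v then 1 else 0 := by
  by_cases h : w = v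
  · subst h; simp [List.count_append]
  · simp [List.count_append, h, Ne.symm h]

lemma pv_step1_cell {p : List Int} {st} (h : PvInv1 p st) (v : Int) :
    (pvStep1Cell st v).2 = pvLabel p v ∧ PvInv1 (p ++ [v]) (pvStep1Cell st v).1 := by
  obtain ⟨h1, h2, h3, h4⟩ := h
  by_cases hv : v ≠ 0 ∧ v ≠ 1
  · obtain ⟨hv0, hv1⟩ := hv
    by_cases hcon : st.1.contains v = true
    · have hcpos : 0 < p.count v := (h2 v hv0 hv1).mp hcon
      by_cases hrec : v ∈ st.2
      · -- v in h, v in recorded: count so far is odd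
        have hodd : p.count v % 2 = 1 := (h3 v hv0 hv1).mp hrec
        simp only [pvStep1Cell, pvLabel, hv0, hv1, ne_eq, not_false_eq_true, and_self, if_true,
          hcon, (PySem.Set.contains_iff _ _).mpr hrec, if_true]
        refine ⟨?_, ?_, ?_, ?_, ?_⟩
        · rw [h1 v hv0 hv1]
          have hck : ((p.count v + 1) / 2 : Nat) = p.count v / 2 + 1 := by omega
          rw [hck]; push_cast; ring_nf
        · intro w hw0 hw1
          rw [pv_count_append]
          by_cases hwv : w = v
          · subst hwv; rw [h1 w hw0 hw1, if_pos rfl]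
            have : ((p.count w + 1) / 2 : Nat) = (p.count w + 1 + 1) / 2 := by omega
            rw [this]
          · simp [hwv, h1 w hw0 hw1]
        · intro w hw0 hw1
          rw [pv_count_append, h2 w hw0 hw1]
          by_cases hwv : w = v
          · subst hwv; rw [if_pos rfl]; omega
          · rw [if_neg hwv]; omega
        · intro w hw0 hw1
          rw [pv_count_append, PySem.Set.mem_discard]
          by_cases hwv : w = v
          · subst hwv
            rw [if_pos rfl]
            simp only [ne_eq, not_true_eq_false, and_false, false_iff]
            omega
          · rw [if_neg hwv]; simp [hwv, h3 w hw0 hw1]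
        · intro w hw; exact h4 w ((PySem.Set.mem_discard _ _ _).mp hw).1
      · -- v in h, not in recorded: count so far is even and positive
        have heven : ¬ p.count v % 2 = 1 := fun hh => hrec ((h3 v hv0 hv1).mpr hh)
        have hrc : PySem.Set.contains st.2 v = false :=
          Bool.eq_false_iff.mpr (fun hb => hrec ((PySem.Set.contains_iff _ _).mp hb))
        simp only [pvStep1Cell, pvLabel, hv0, hv1, ne_eq, not_false_eq_true, and_self, if_true,
          hcon, hrc, Bool.false_eq_true, if_false, if_true]
        refine ⟨?_, ?_, ?_, ?_, ?_⟩
        · rw [PySem.Dict.getD_insert_self, h1 v hv0 hv1]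
          have hck : ((p.count v + 1) / 2 : Nat) + 1 = p.count v / 2 + 1 := by omega
          congr 2
          omega
        · intro w hw0 hw1
          rw [pv_count_append, PySem.Dict.getD_insert]
          by_cases hwv : w = v
          · subst hwv; rw [if_pos rfl, if_pos rfl, h1 w hw0 hw1]
            push_cast; omega
          · simp [hwv, h1 w hw0 hw1]
        · intro w hw0 hw1
          rw [pv_count_append, PySem.Dict.contains_insert]
          by_cases hwv : w = v
          · subst hwv; simp
          · simp [hwv, h2 w hw0 hw1, beq_iff_eq]
        · intro w hw0 hw1
          rw [pv_count_append, PySem.Set.mem_add]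
          by_cases hwv : w = v
          · subst hwv; simp [h3 w hw0 hw1]; omega
          · simp [hwv, h3 w hw0 hw1]
        · intro w hw
          rcases (PySem.Set.mem_add _ _ _).mp hw with hw' | hw'
          · exact h4 w hw'
          · exact hw' ▸ ⟨hv0, hv1⟩
    · -- v not in h: first occurrence
      have hc0 : p.count v = 0 := by
        rcases Nat.eq_zero_or_pos (p.count v) with h0 | h0
        · exact h0
        · exact absurd ((h2 v hv0 hv1).mpr h0) hcon
      have hrc : v ∉ st.2 := fun hm => by
        have := (h3 v hv0 hv1).mp hm; omega
      have hconf : st.1.contains v = false := Bool.eq_false_iff.mpr hcon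
      simp only [pvStep1Cell, pvLabel, hv0, hv1, ne_eq, not_false_eq_true, and_self, if_true,
        hconf, Bool.false_eq_true, if_false]
      refine ⟨?_, ?_, ?_, ?_, ?_⟩
      · rw [PySem.Dict.getD_insert_self, hc0]; norm_num
      · intro w hw0 hw1
        rw [pv_count_append, PySem.Dict.getD_insert]
        by_cases hwv : w = v
        · subst hwv; rw [if_pos rfl, if_pos rfl, hc0]; norm_num
        · simp [hwv, h1 w hw0 hw1]
      · intro w hw0 hw1
        rw [pv_count_append, PySem.Dict.contains_insert]
        by_cases hwv : w = v
        · subst hwv; simp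
        · simp [hwv, h2 w hw0 hw1, beq_iff_eq]
      · intro w hw0 hw1
        rw [pv_count_append, PySem.Set.mem_add]
        by_cases hwv : w = v
        · subst hwv; simp [h3 w hw0 hw1, hc0]
        · simp [hwv, h3 w hw0 hw1]
      · intro w hw
        rcases (PySem.Set.mem_add _ _ _).mp hw with hw' | hw'
        · exact h4 w hw'
        · exact hw' ▸ ⟨hv0, hv1⟩
  · -- v is 0 or 1: untouched
    have hv01 : v = 0 ∨ v = 1 := by
      by_contra hcon; exact hv ⟨fun h0 => hcon (Or.inl h0), fun h1 => hcon (Or.inr h1)⟩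
    have hwv : ∀ w : Int, w ≠ 0 → w ≠ 1 → w ≠ v := by
      intro w hw0 hw1; rcases hv01 with h' | h' <;> subst h' <;> assumption
    simp only [pvStep1Cell, pvLabel, hv, if_false]
    refine ⟨by trivial, ?_, ?_, ?_, h4⟩
    · intro w hw0 hw1
      rw [pv_count_append, if_neg (hwv w hw0 hw1)]; simp [h1 w hw0 hw1]
    · intro w hw0 hw1
      rw [pv_count_append, if_neg (hwv w hw0 hw1)]; simp [h2 w hw0 hw1]
    · intro w hw0 hw1
      rw [pv_count_append, if_neg (hwv w hw0 hw1)]; simp [h3 w hw0 hw1]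

lemma pv_step1_row (row : List Int) : ∀ (p : List Int) st (acc : List PvCell), PvInv1 p st →
    (row.foldl (fun q v => let r := pvStep1Cell q.1 v; (r.1, q.2 ++ [r.2])) (st, acc)).2
      = acc ++ pvGhostRow p row
    ∧ PvInv1 (p ++ row)
      (row.foldl (fun q v => let r := pvStep1Cell q.1 v; (r.1, q.2 ++ [r.2])) (st, acc)).1 := by
  induction row with
  | nil => intro p st acc h; simpa [pvGhostRow] using h
  | cons v t ih =>
    intro p st acc h
    obtain ⟨hcell, hinv⟩ := pv_step1_cell h v
    have hih := ih (p ++ [v]) (pvStep1Cell st v).1 (acc ++ [(pvStep1Cell st v).2]) hinv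
    simp only [List.foldl_cons]
    constructor
    · rw [hih.1, hcell]
      simp [pvGhostRow]
    · have := hih.2
      simpa [List.append_assoc] using this

lemma pv_step1_mat (rows : List (List Int)) :
    ∀ (p : List Int) st (acc : List (List PvCell)), PvInv1 p st →
    (rows.foldl (fun q row => let r := pvStep1Row q.1 row; (r.1, q.2 ++ [r.2])) (st, acc)).2
      = acc ++ pvGhostMat p rows
    ∧ PvInv1 (p ++ rows.flatten)
      (rows.foldl (fun q row => let r := pvStep1Row q.1 row; (r.1, q.2 ++ [r.2])) (st, acc)).1 := by
  induction rows with
  | nil => intro p st acc h; simpa [pvGhostMat] using h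
  | cons row t ih =>
    intro p st acc h
    have hrow := pv_step1_row row p st [] h
    have hih := ih (p ++ row) (pvStep1Row st row).1 (acc ++ [(pvStep1Row st row).2]) hrow.2
    simp only [List.foldl_cons]
    constructor
    · rw [hih.1]
      have : (pvStep1Row st row).2 = pvGhostRow p row := by simpa [pvStep1Row] using hrow.1
      rw [this]
      simp [pvGhostMat]
    · have := hih.2
      simpa [List.append_assoc] using this

-- ---- the singles set ----
lemma pv_singles_mem {flat : List Int} {st} (h : PvInv1 flat st) (x : PvCell) :
    x ∈ st.2.foldl (fun s v => PySem.Set.add s (PvCell.str (pvEnc v (st.1.getD v 0)))) PySem.Set.empty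
    ↔ ∃ w : Int, w ≠ 0 ∧ w ≠ 1 ∧ flat.count w % 2 = 1 ∧
        x = PvCell.str (pvEnc w ((((flat.count w + 1) / 2 : Nat) : Int))) := by
  obtain ⟨h1, h2, h3, h4⟩ := h
  rw [PySem.Set.mem_foldl_add]
  simp only [PySem.Set.empty]
  constructor
  · rintro (hx | ⟨w, hw, hxe⟩)
    · simp at hx
    · obtain ⟨hw0, hw1⟩ := h4 w hw
      exact ⟨w, hw0, hw1, (h3 w hw0 hw1).mp hw, by rw [hxe, h1 w hw0 hw1]⟩
  · rintro ⟨w, hw0, hw1, hodd, hxe⟩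
    exact Or.inr ⟨w, (h3 w hw0 hw1).mpr hodd, by rw [hxe, h1 w hw0 hw1]⟩

-- ---- pass-2 / B lockstep invariant ----
def PvInv2 (flat p : List Int) (stA : PySem.Dict PvCell Int × Int)
    (stB : PySem.Dict Int Int × PySem.Dict (Int × Int) Int × Int) : Prop :=
  stA.2 = stB.2.2 ∧
  (∀ v : Int, v ≠ 0 → v ≠ 1 → stB.1.getD v 0 = (p.count v : Int)) ∧
  (∀ v : Int, v ≠ 0 → v ≠ 1 → ∀ k : Nat, 1 ≤ k →
     stA.1.get? (PvCell.str (pvEnc v (k : Int))) =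
       if flat.count v % 2 = 1 ∧ k = (flat.count v + 1) / 2 then
         (if flat.count v ≤ p.count v then some 1 else none)
       else stB.2.1.get? (v, (k : Int) - 1)) ∧
  (∀ v : Int, v ≠ 0 → v ≠ 1 → flat.count v % 2 = 1 →
     stB.2.1.get? (v, (((flat.count v + 1) / 2 : Nat) : Int) - 1) = none)

lemma pv_step2Cell_str (singles : PySem.Set PvCell) (st : PySem.Dict PvCell Int × Int)
    (s : List Char) : pvStep2Cell singles st (PvCell.str s) = pvStep2Go singles st (PvCell.str s) :=
  rfl

lemma pv_step2_cell {flat p rest : List Int} {v : Int} (hflat : flat = p ++ v :: rest)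
    {singles : PySem.Set PvCell}
    (hs : ∀ x : PvCell, x ∈ singles ↔ ∃ w : Int, w ≠ 0 ∧ w ≠ 1 ∧ flat.count w % 2 = 1 ∧
        x = PvCell.str (pvEnc w ((((flat.count w + 1) / 2 : Nat) : Int))))
    {counts : PySem.Dict Int Int}
    (hc : ∀ w : Int, w ≠ 0 → w ≠ 1 → counts.getD w 0 = (flat.count w : Int))
    {stA stB} (h : PvInv2 flat p stA stB) :
    (pvStep2Cell singles stA (pvLabel p v)).2 = (pvAltCell counts stB v).2 ∧
    PvInv2 flat (p ++ [v]) (pvStep2Cell singles stA (pvLabel p v)).1 (pvAltCell counts stB v).1 := by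
  obtain ⟨hct, hocc, hkey, hsingle⟩ := h
  have hcT : p.count v < flat.count v := by
    rw [hflat, List.count_append]
    simp
  by_cases hv : v = 0 ∨ v = 1
  · -- 0/1 cell: both sides copy it through
    have hwv : ∀ w : Int, w ≠ 0 → w ≠ 1 → w ≠ v := by
      intro w hw0 hw1; rcases hv with h' | h' <;> subst h' <;> assumption
    have hA : pvStep2Cell singles stA (pvLabel p v) = (stA, v) := by
      rcases hv with h' | h' <;> subst h' <;> simp [pvLabel, pvStep2Cell]
    have hB : pvAltCell counts stB v = (stB, v) := by
      simp [pvAltCell, hv]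
    rw [hA, hB]
    refine ⟨rfl, hct, ?_, ?_, hsingle⟩
    · intro w hw0 hw1
      rw [pv_count_append, if_neg (hwv w hw0 hw1)]
      simpa using hocc w hw0 hw1
    · intro w hw0 hw1 k hk
      rw [pv_count_append, if_neg (hwv w hw0 hw1)]
      simpa using hkey w hw0 hw1 k hk
  · have hv0 : v ≠ 0 := fun h' => hv (Or.inl h')
    have hv1 : v ≠ 1 := fun h' => hv (Or.inr h')
    set c : Nat := p.count v with hcdef
    set T : Nat := flat.count v with hTdef
    have hl : pvLabel p v = PvCell.str (pvEnc v (((c / 2 : Nat) : Int) + 1)) := by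
      unfold pvLabel
      rw [if_pos ⟨hv0, hv1⟩]
    have hkkcast : (((c / 2 : Nat) : Int) + 1) = ((c / 2 + 1 : Nat) : Int) := by push_cast; ring
    -- membership of the current label in `singles`
    have hsin : (PvCell.str (pvEnc v (((c / 2 : Nat) : Int) + 1)) ∈ singles)
        ↔ (T % 2 = 1 ∧ c + 1 = T) := by
      rw [hs]
      constructor
      · rintro ⟨w, hw0, hw1, hwodd, hweq⟩
        have henc := PvCell.str.inj hweq
        obtain ⟨hvw, hkw⟩ := pv_enc_inj (by omega) (by omega) henc
        subst hvw
        have hnat : c / 2 + 1 = (T + 1) / 2 := by exact_mod_cast hkkcast ▸ hkw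
        exact ⟨hwodd, by omega⟩
      · rintro ⟨hodd, hc1⟩
        exact ⟨v, hv0, hv1, hodd, by rw [hkkcast]; congr 2; omega⟩
    have hoccv : stB.1.getD v 0 + 1 = ((c + 1 : Nat) : Int) := by
      rw [hocc v hv0 hv1]; push_cast; ring
    have hcntv : counts.getD v 0 = (T : Int) := hc v hv0 hv1
    have hBcond : (PySem.Int.mod (counts.getD v 0) 2 = 1 ∧ stB.1.getD v 0 + 1 = counts.getD v 0)
        ↔ (T % 2 = 1 ∧ c + 1 = T) := by
      have hm2 : PySem.Int.mod ((T : Nat) : Int) 2 = ((T % 2 : Nat) : Int) := by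
        exact_mod_cast PySem.Int.mod_natCast T 2
      rw [hcntv, hocc v hv0 hv1, hm2]
      constructor
      · rintro ⟨hm, he⟩
        exact ⟨by exact_mod_cast hm, by exact_mod_cast he⟩
      · rintro ⟨hm, he⟩
        exact ⟨by exact_mod_cast hm, by exact_mod_cast he⟩
    by_cases hS : T % 2 = 1 ∧ c + 1 = T
    · -- the unpaired final occurrence of a value with odd total count: both write 1
      have hsc : PySem.Set.contains singles (PvCell.str (pvEnc v (((c / 2 : Nat) : Int) + 1))) = true :=
        (PySem.Set.contains_iff _ _).mpr (hsin.mpr hS)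
      have hA : pvStep2Cell singles stA (pvLabel p v)
          = ((stA.1.insert (PvCell.str (pvEnc v (((c / 2 : Nat) : Int) + 1))) 1, stA.2), 1) := by
        rw [hl, pv_step2Cell_str]
        unfold pvStep2Go
        rw [if_pos hsc]
        simp only [PySem.Dict.getD_insert_self]
      have hB : pvAltCell counts stB v
          = ((stB.1.insert v (stB.1.getD v 0 + 1), stB.2.1, stB.2.2), 1) := by
        simp only [pvAltCell, hv, if_false]
        rw [if_pos (hBcond.mpr hS)]
      rw [hA, hB]
      refine ⟨rfl, hct, ?_, ?_, hsingle⟩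
      · intro w hw0 hw1
        rw [pv_count_append, PySem.Dict.getD_insert]
        by_cases hwv : w = v
        · subst hwv; rw [if_pos rfl, if_pos rfl, hoccv]
        · rw [if_neg hwv, if_neg hwv]; simpa using hocc w hw0 hw1
      · intro w hw0 hw1 k hk
        rw [pv_count_append, PySem.Dict.get?_insert]
        by_cases hwk : w = v ∧ k = c / 2 + 1
        · obtain ⟨hwv, hkk⟩ := hwk
          subst hwv; subst hkk
          rw [if_pos (by rw [hkkcast]), if_pos rfl, if_pos ⟨hS.1, by omega⟩, if_pos (by omega)]
        · have hne : PvCell.str (pvEnc w (k : Int))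
              ≠ PvCell.str (pvEnc v (((c / 2 : Nat) : Int) + 1)) := by
            intro heq
            obtain ⟨h1', h2'⟩ := pv_enc_inj (by exact_mod_cast hk) (by omega)
              (PvCell.str.inj heq)
            exact hwk ⟨h1', by rw [hkkcast] at h2'; exact_mod_cast h2'⟩
          rw [if_neg hne, hkey w hw0 hw1 k hk]
          by_cases hwv : w = v
          · subst hwv
            rw [if_pos rfl]
            by_cases hcond : T % 2 = 1 ∧ k = (T + 1) / 2
            · exact absurd ⟨rfl, by omega⟩ hwk
            · rw [if_neg hcond, if_neg hcond]
          · rw [if_neg hwv]; norm_num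
    · -- a paired occurrence: both sides consult / extend their pair dictionary in step
      have hsc : PySem.Set.contains singles (PvCell.str (pvEnc v (((c / 2 : Nat) : Int) + 1))) = false :=
        Bool.eq_false_iff.mpr (fun hb => hS (hsin.mp ((PySem.Set.contains_iff _ _).mp hb)))
      -- the label's lookup in A's dict equals the pair-key lookup in B's dict
      have hlook : stA.1.get? (PvCell.str (pvEnc v (((c / 2 : Nat) : Int) + 1)))
          = stB.2.1.get? (v, ((c / 2 : Nat) : Int)) := by
        have := hkey v hv0 hv1 (c / 2 + 1) (by omega)
        rw [hkkcast]
        rw [this, if_neg (fun hcond => hS ⟨hcond.1, by omega⟩)]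
        congr 2
        push_cast
        ring
      have hBkey : (v, PySem.Int.floordiv (stB.1.getD v 0 + 1 - 1) 2) = (v, ((c / 2 : Nat) : Int)) := by
        rw [hocc v hv0 hv1]
        congr 1
        have : ((c : Int) + 1 - 1) = (c : Int) := by ring
        rw [this]
        exact_mod_cast PySem.Int.floordiv_natCast c 2
      by_cases hpres : ∃ m, stB.2.1.get? (v, ((c / 2 : Nat) : Int)) = some m
      · obtain ⟨m, hm⟩ := hpres
        have hcontA : stA.1.contains (PvCell.str (pvEnc v (((c / 2 : Nat) : Int) + 1))) = true := by
          rw [PySem.Dict.contains_eq_isSome_get?, hlook, hm]; rfl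
        have hcontB : stB.2.1.contains (v, ((c / 2 : Nat) : Int)) = true := by
          rw [PySem.Dict.contains_eq_isSome_get?, hm]; rfl
        have hA : pvStep2Cell singles stA (pvLabel p v) = (stA, m) := by
          rw [hl, pv_step2Cell_str]
          unfold pvStep2Go
          rw [if_neg (by rw [hsc]; exact Bool.false_ne_true), if_neg (fun hC => hC hcontA)]
          simp only []
          rw [PySem.Dict.getD_of_get?_eq_some _ _ (hlook.trans hm)]
        have hB : pvAltCell counts stB v = ((stB.1.insert v (stB.1.getD v 0 + 1), stB.2.1, stB.2.2), m) := by
          simp only [pvAltCell, hv, if_false]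
          rw [if_neg (fun hcond => hS (hBcond.mp hcond)), hBkey, if_pos hcontB,
            PySem.Dict.getD_of_get?_eq_some _ _ hm]
        rw [hA, hB]
        refine ⟨rfl, hct, ?_, ?_, hsingle⟩
        · intro w hw0 hw1
          rw [pv_count_append, PySem.Dict.getD_insert]
          by_cases hwv : w = v
          · subst hwv; rw [if_pos rfl, if_pos rfl, hoccv]
          · rw [if_neg hwv, if_neg hwv]; simpa using hocc w hw0 hw1
        · intro w hw0 hw1 k hk
          rw [pv_count_append, hkey w hw0 hw1 k hk]
          by_cases hwv : w = v
          · subst hwv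
            rw [if_pos rfl]
            by_cases hcond : T % 2 = 1 ∧ k = (T + 1) / 2
            · rw [if_pos hcond, if_pos hcond, if_neg (by omega), if_neg (by
                intro hle
                exact hS ⟨hcond.1, by omega⟩)]
            · rw [if_neg hcond, if_neg hcond]
          · rw [if_neg hwv]; norm_num
      · have hnone : stB.2.1.get? (v, ((c / 2 : Nat) : Int)) = none := by
          cases hg : stB.2.1.get? (v, ((c / 2 : Nat) : Int)) with
          | none => rfl
          | some m => exact absurd ⟨m, hg⟩ hpres
        have hcontA : stA.1.contains (PvCell.str (pvEnc v (((c / 2 : Nat) : Int) + 1))) = false := by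
          rw [PySem.Dict.contains_eq_isSome_get?, hlook, hnone]; rfl
        have hcontB : stB.2.1.contains (v, ((c / 2 : Nat) : Int)) = false := by
          rw [PySem.Dict.contains_eq_isSome_get?, hnone]; rfl
        have hA : pvStep2Cell singles stA (pvLabel p v)
            = ((stA.1.insert (PvCell.str (pvEnc v (((c / 2 : Nat) : Int) + 1))) stA.2, stA.2 + 1),
               stA.2) := by
          rw [hl, pv_step2Cell_str]
          unfold pvStep2Go
          rw [if_neg (by rw [hsc]; exact Bool.false_ne_true),
            if_pos (by rw [hcontA]; exact Bool.false_ne_true)]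
          simp only [PySem.Dict.getD_insert_self]
        have hB : pvAltCell counts stB v
            = ((stB.1.insert v (stB.1.getD v 0 + 1),
                stB.2.1.insert (v, ((c / 2 : Nat) : Int)) stB.2.2, stB.2.2 + 1), stB.2.2) := by
          simp only [pvAltCell, hv, if_false]
          rw [if_neg (fun hcond => hS (hBcond.mp hcond)), hBkey, if_neg (by rw [hcontB]; exact
            Bool.false_ne_true)]
        rw [hA, hB]
        refine ⟨hct, by rw [hct], ?_, ?_, ?_⟩
        · intro w hw0 hw1
          rw [pv_count_append, PySem.Dict.getD_insert]
          by_cases hwv : w = v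
          · subst hwv; rw [if_pos rfl, if_pos rfl, hoccv]
          · rw [if_neg hwv, if_neg hwv]; simpa using hocc w hw0 hw1
        · intro w hw0 hw1 k hk
          rw [pv_count_append, PySem.Dict.get?_insert, PySem.Dict.get?_insert]
          by_cases hwk : w = v ∧ k = c / 2 + 1
          · obtain ⟨hwv, hkk⟩ := hwk
            subst hwv; subst hkk
            rw [if_pos (by rw [hkkcast]), if_pos rfl,
              if_neg (fun hcond => hS ⟨hcond.1, by omega⟩),
              if_pos (by congr 1; push_cast; ring), hct]
          · have hne : PvCell.str (pvEnc w (k : Int))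
                ≠ PvCell.str (pvEnc v (((c / 2 : Nat) : Int) + 1)) := by
              intro heq
              obtain ⟨h1', h2'⟩ := pv_enc_inj (by exact_mod_cast hk) (by omega)
                (PvCell.str.inj heq)
              exact hwk ⟨h1', by rw [hkkcast] at h2'; exact_mod_cast h2'⟩
            have hneB : ((w, (k : Int) - 1) : Int × Int) ≠ (v, ((c / 2 : Nat) : Int)) := by
              intro heq
              have he1 := congrArg Prod.fst heq
              have he2 := congrArg Prod.snd heq
              simp only [] at he1 he2
              exact hwk ⟨he1, by omega⟩
            rw [if_neg hne, hkey w hw0 hw1 k hk]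
            by_cases hwv : w = v
            · subst hwv
              rw [if_pos rfl]
              by_cases hcond : T % 2 = 1 ∧ k = (T + 1) / 2
              · rw [if_pos hcond, if_pos hcond, if_neg (by omega), if_neg (by
                  intro hle
                  exact hS ⟨hcond.1, by omega⟩)]
              · rw [if_neg hcond, if_neg hcond, if_neg hneB]
            · rw [if_neg hwv, if_neg hneB]; norm_num
        · intro w hw0 hw1 hwodd
          rw [PySem.Dict.get?_insert]
          by_cases hwv : w = v
          · subst hwv
            rw [if_neg (by
              intro heq
              obtain ⟨-, he2⟩ := Prod.ext_iff.mp heq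
              have : (T + 1) / 2 = c / 2 + 1 := by omega
              exact hS ⟨hwodd, by omega⟩)]
            exact hsingle w hw0 hw1 hwodd
          · rw [if_neg (by intro heq; exact hwv (Prod.ext_iff.mp heq).1)]
            exact hsingle w hw0 hw1 hwodd
lemma pv_step2_row {flat : List Int} {singles : PySem.Set PvCell}
    (hs : ∀ x : PvCell, x ∈ singles ↔ ∃ w : Int, w ≠ 0 ∧ w ≠ 1 ∧ flat.count w % 2 = 1 ∧
        x = PvCell.str (pvEnc w ((((flat.count w + 1) / 2 : Nat) : Int))))
    {counts : PySem.Dict Int Int}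
    (hc : ∀ w : Int, w ≠ 0 → w ≠ 1 → counts.getD w 0 = (flat.count w : Int)) :
    ∀ (row p rest : List Int), flat = p ++ (row ++ rest) →
    ∀ (acc : List Int) stA stB, PvInv2 flat p stA stB →
    ((pvGhostRow p row).foldl
        (fun q c => let r := pvStep2Cell singles q.1 c; (r.1, q.2 ++ [r.2])) (stA, acc)).2
      = (row.foldl (fun q v => let r := pvAltCell counts q.1 v; (r.1, q.2 ++ [r.2])) (stB, acc)).2
    ∧ PvInv2 flat (p ++ row)
      ((pvGhostRow p row).foldl
        (fun q c => let r := pvStep2Cell singles q.1 c; (r.1, q.2 ++ [r.2])) (stA, acc)).1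
      (row.foldl (fun q v => let r := pvAltCell counts q.1 v; (r.1, q.2 ++ [r.2])) (stB, acc)).1 := by
  intro row
  induction row with
  | nil =>
    intro p rest hflat acc stA stB h
    exact ⟨rfl, by simpa using h⟩
  | cons v t ih =>
    intro p rest hflat acc stA stB h
    have hflat' : flat = p ++ v :: (t ++ rest) := by rw [hflat]; simp
    obtain ⟨hout, hinv⟩ := pv_step2_cell hflat' hs hc h
    have hih := ih (p ++ [v]) rest (by rw [hflat]; simp)
      (acc ++ [(pvAltCell counts stB v).2]) (pvStep2Cell singles stA (pvLabel p v)).1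
      (pvAltCell counts stB v).1 hinv
    simp only [pvGhostRow, List.foldl_cons]
    constructor
    · rw [hout]
      exact hih.1
    · have := hih.2
      rw [hout]
      simpa [List.append_assoc] using this

lemma pv_step2_mat {flat : List Int} {singles : PySem.Set PvCell}
    (hs : ∀ x : PvCell, x ∈ singles ↔ ∃ w : Int, w ≠ 0 ∧ w ≠ 1 ∧ flat.count w % 2 = 1 ∧
        x = PvCell.str (pvEnc w ((((flat.count w + 1) / 2 : Nat) : Int))))
    {counts : PySem.Dict Int Int}
    (hc : ∀ w : Int, w ≠ 0 → w ≠ 1 → counts.getD w 0 = (flat.count w : Int)) :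
    ∀ (rows : List (List Int)) (p rest : List Int), flat = p ++ (rows.flatten ++ rest) →
    ∀ (acc : List (List Int)) stA stB, PvInv2 flat p stA stB →
    ((pvGhostMat p rows).foldl
        (fun q row => let r := pvStep2Row singles q.1 row; (r.1, q.2 ++ [r.2])) (stA, acc)).2
      = (rows.foldl (fun q row => let r := pvAltRow counts q.1 row; (r.1, q.2 ++ [r.2])) (stB, acc)).2 := by
  intro rows
  induction rows with
  | nil => intro p rest hflat acc stA stB h; rfl
  | cons row t ih =>
    intro p rest hflat acc stA stB h
    simp only [pvGhostMat, List.foldl_cons]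
    have h2 : (pvStep2Row singles stA (pvGhostRow p row)).2 = (pvAltRow counts stB row).2 := by
      have := pv_step2_row hs hc row p (t.flatten ++ rest) (by rw [hflat]; simp) [] stA stB h
      exact this.1
    have hinv : PvInv2 flat (p ++ row) (pvStep2Row singles stA (pvGhostRow p row)).1
        (pvAltRow counts stB row).1 := by
      have := pv_step2_row hs hc row p (t.flatten ++ rest) (by rw [hflat]; simp) [] stA stB h
      exact this.2
    rw [h2]
    exact ih (p ++ row) rest (by rw [hflat]; simp) _ _ _ hinv

-- ---- B's counts dict ----
lemma pv_counts_getD (mat : List (List Int)) (w : Int) (hw0 : w ≠ 0) (hw1 : w ≠ 1) :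
    (pvCounts mat).getD w 0 = (mat.flatten.count w : Int) := by
  have hfold : pvCounts mat
      = (mat.flatten.filter (fun v => decide (v ≠ 0 ∧ v ≠ 1))).foldl
          (fun d v => d.insert v (d.getD v 0 + 1)) PySem.Dict.empty := by
    unfold pvCounts
    rw [List.foldl_filter, List.foldl_flatten]
    congr 1
    funext d row
    congr 1
    funext d' v
    by_cases hv : v ≠ 0 ∧ v ≠ 1 <;> simp [hv]
  rw [hfold, PySem.Dict.getD_foldl_insert_add_one,
    List.count_filter (by simp [hw0, hw1]), PySem.Dict.getD_empty]
  ring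

-- ===== VERDICT (by name: the statement is the Claim_ definition above) =====
lemma pv_inv1_init : PvInv1 [] (PySem.Dict.empty, PySem.Set.empty) := by
  refine ⟨?_, ?_, ?_, ?_⟩ <;>
    simp [PySem.Dict.getD_empty, PySem.Dict.contains_empty, PySem.Set.empty]

lemma pv_inv2_init {flat : List Int} :
    PvInv2 flat [] (PySem.Dict.empty, 2) (PySem.Dict.empty, PySem.Dict.empty, 2) := by
  refine ⟨rfl, ?_, ?_, ?_⟩
  · intro w hw0 hw1; simp [PySem.Dict.getD_empty]
  · intro w hw0 hw1 k hk
    rw [PySem.Dict.get?_empty, PySem.Dict.get?_empty]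
    split_ifs with h1 h2
    · exact absurd h2 (by simp [List.count_nil]; omega)
    · rfl
    · rfl
  · intro w hw0 hw1 hodd; exact PySem.Dict.get?_empty _

theorem twoify_spec : Claim_equal_twoify := by
  unfold Claim_equal_twoify
  intro mat _hdom
  unfold Spec_twoify twoify twoify_alt
  have h1 := pv_step1_mat mat [] (PySem.Dict.empty, PySem.Set.empty) [] pv_inv1_init
  have hghost : (pvStep1 mat).2 = pvGhostMat [] mat := by
    have := h1.1
    simpa [pvStep1] using this
  have hinv1 : PvInv1 mat.flatten (pvStep1 mat).1 := by
    have := h1.2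
    simpa [pvStep1] using this
  have hsing := pv_singles_mem (flat := mat.flatten) hinv1
  have hcnt := fun (w : Int) (hw0 : w ≠ 0) (hw1 : w ≠ 1) => pv_counts_getD mat w hw0 hw1
  have h2 := pv_step2_mat (flat := mat.flatten) hsing hcnt mat [] [] (by simp) []
    (PySem.Dict.empty, 2) (PySem.Dict.empty, PySem.Dict.empty, 2) pv_inv2_init
  calc (pvStep2 ((pvStep1 mat).1.2.foldl
          (fun s v => PySem.Set.add s (PvCell.str (pvEnc v ((pvStep1 mat).1.1.getD v 0))))
          PySem.Set.empty) (pvStep1 mat).2).2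
      = (pvStep2 ((pvStep1 mat).1.2.foldl
          (fun s v => PySem.Set.add s (PvCell.str (pvEnc v ((pvStep1 mat).1.1.getD v 0))))
          PySem.Set.empty) (pvGhostMat [] mat)).2 := by rw [hghost]
    _ = _ := h2
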